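-- pv_equiv track=rewrite | github.com/Answeror/aip | aip/dag.py | make_children
-- ===== SOURCE A (Python) =====
-- def make_children(parents):
--     children = {}
--     for c, ps in parents.items():
--         children[c] = children.get(c, set())
--         for p in ps:
--             children[p] = children.get(p, set())
--             children[p].add(c)
--     return children
-- ===== SOURCE B (Python) =====
-- def make_children(parents):
--     # first-appearance order of every node: each key, then its parents
--     order = []
--     seen = set()
--     for c, ps in parents.items():
--         for n in (c, *ps):
--             if n not in seen:
--                 seen.add(n)
--                 order.append(n)
--     # a node's children are exactly the keys whose parent list mentions it
--     return {n: {c for c, ps in parents.items() if n in ps} for n in order}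
-- ===== Notes on version B (the rewrite author's own statement) =====
-- stated objective: alternative
-- what changed: A builds the result incrementally by mutating a dict while walking edges (ensure-entry then add per edge); B never populates incrementally: it first computes the first-appearance node order, then constructs each node's child set independently by a per-node comprehension scanning all of parents for lists that mention it.
import Mathlib
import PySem

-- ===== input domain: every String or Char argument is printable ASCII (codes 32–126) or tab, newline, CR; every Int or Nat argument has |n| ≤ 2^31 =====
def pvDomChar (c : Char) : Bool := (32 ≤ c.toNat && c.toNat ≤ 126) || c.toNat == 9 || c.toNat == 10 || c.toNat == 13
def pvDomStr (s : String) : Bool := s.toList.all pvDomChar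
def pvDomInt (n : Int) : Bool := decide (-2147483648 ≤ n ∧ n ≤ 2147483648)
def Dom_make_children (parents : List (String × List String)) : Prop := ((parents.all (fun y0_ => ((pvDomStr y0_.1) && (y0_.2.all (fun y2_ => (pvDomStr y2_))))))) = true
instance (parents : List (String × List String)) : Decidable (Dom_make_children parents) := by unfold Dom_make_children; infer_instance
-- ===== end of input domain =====

-- A builds the children dict by incremental mutation while walking edges; B instead
-- computes the first-appearance node order and then builds each node's child set
-- independently by a per-node scan of parents ('alternative' objective; same value, proved).

-- ===== PORT A =====
def make_children (parents : List (String × List String)) : List (String × List String) :=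
  (parents.foldl
    (fun children cp =>
      let c := cp.1
      let children := children.insert c (children.getD c PySem.Set.empty)
      cp.2.foldl
        (fun children p =>
          let children := children.insert p (children.getD p PySem.Set.empty)
          children.modify p PySem.Set.empty (fun s => PySem.Set.add s c))
        children)
    PySem.Dict.empty).items

-- ===== PORT B =====
def make_children_alt (parents : List (String × List String)) : List (String × List String) :=
  let os := parents.foldl
    (fun (acc : List String × PySem.Set String) cp =>
      (cp.1 :: cp.2).foldl
        (fun acc n =>
          if PySem.Set.contains acc.2 n then acc
          else (acc.1 ++ [n], PySem.Set.add acc.2 n))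
        acc)
    ([], PySem.Set.empty)
  os.1.map (fun n =>
    (n, parents.foldl (fun s cp => if cp.2.contains n then PySem.Set.add s cp.1 else s)
          PySem.Set.empty))

-- ===== PRECONDITION & SPEC =====
def Spec_make_children (parents : List (String × List String)) (out : List (String × List String)) : Prop := out = make_children_alt parents
instance (parents : List (String × List String)) (out : List (String × List String)) : Decidable (Spec_make_children parents out) := by unfold Spec_make_children; infer_instance

-- ===== CLAIM (what is proved, stated in full; the proofs are below) =====
def Claim_equal_make_children : Prop := ∀ (parents : List (String × List String)), Dom_make_children parents → Spec_make_children parents (make_children parents)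

-- ===== LEMMAS AND PROOFS =====

-- Abbreviations for the primitive steps A's loop is made of.
def EnsD (d : PySem.Dict String (PySem.Set String)) (n : String) : PySem.Dict String (PySem.Set String) :=
  d.insert n (d.getD n PySem.Set.empty)

def AddD (c : String) (d : PySem.Dict String (PySem.Set String)) (p : String) : PySem.Dict String (PySem.Set String) :=
  d.modify p PySem.Set.empty (fun s => PySem.Set.add s c)

def EnsFold (d : PySem.Dict String (PySem.Set String)) (ns : List String) : PySem.Dict String (PySem.Set String) :=
  ns.foldl EnsD d

def PopOne (d : PySem.Dict String (PySem.Set String)) (c : String) (ps : List String) : PySem.Dict String (PySem.Set String) :=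
  ps.foldl (fun d p => AddD c d p) d

def NodeSeq (l : List (String × List String)) : List String :=
  l.flatMap (fun cp => cp.1 :: cp.2)

-- membership in keys vs contains
theorem dict_contains_iff (d : PySem.Dict String (PySem.Set String)) (k : String) :
    d.contains k = true ↔ k ∈ d.keys := by
  simp [PySem.Dict.contains, PySem.Dict.keys, List.any_eq_true, List.mem_map]

theorem find_on_split (l1 l2 : List (String × PySem.Set String)) (k : String) (v : PySem.Set String)
    (h1 : ∀ q ∈ l1, q.1 ≠ k) :
    List.find? (fun p => p.1 == k) (l1 ++ (k, v) :: l2) = some (k, v) := by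
  induction l1 with
  | nil => simp
  | cons a t ih =>
      have ha : (a.1 == k) = false := by simp [h1 a (by simp)]
      simp only [List.cons_append, List.find?_cons, ha]
      exact ih (fun q hq => h1 q (by simp [hq]))

theorem map_id_of_ne (l : List (String × PySem.Set String)) (k : String) (w : PySem.Set String)
    (h : ∀ q ∈ l, q.1 ≠ k) :
    l.map (fun p => if p.1 == k then (k, w) else p) = l := by
  induction l with
  | nil => rfl
  | cons a t ih =>
      have ha : (a.1 == k) = false := by simp [h a (by simp)]
      simp only [List.map_cons, ha, Bool.false_eq_true, if_false]
      rw [ih (fun q hq => h q (by simp [hq]))]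

theorem map_on_split (l1 l2 : List (String × PySem.Set String)) (k : String) (v w : PySem.Set String)
    (h1 : ∀ q ∈ l1, q.1 ≠ k) (h2 : ∀ q ∈ l2, q.1 ≠ k) :
    (l1 ++ (k, v) :: l2).map (fun p => if p.1 == k then (k, w) else p) = l1 ++ (k, w) :: l2 := by
  rw [List.map_append, map_id_of_ne l1 k w h1]
  simp only [List.map_cons]
  rw [if_pos (by simp), map_id_of_ne l2 k w h2]

theorem contains_of_split (l1 l2 : List (String × PySem.Set String)) (k : String) (v : PySem.Set String) :
    (PySem.Dict.mk (l1 ++ (k, v) :: l2)).contains k = true := by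
  simp [PySem.Dict.contains]

theorem getD_of_split (l1 l2 : List (String × PySem.Set String)) (k : String) (v d0 : PySem.Set String)
    (h1 : ∀ q ∈ l1, q.1 ≠ k) :
    (PySem.Dict.mk (l1 ++ (k, v) :: l2)).getD k d0 = v := by
  simp [PySem.Dict.getD, PySem.Dict.get?, find_on_split l1 l2 k v h1]

theorem insert_of_split (l1 l2 : List (String × PySem.Set String)) (k : String) (v w : PySem.Set String)
    (h1 : ∀ q ∈ l1, q.1 ≠ k) (h2 : ∀ q ∈ l2, q.1 ≠ k) :
    (PySem.Dict.mk (l1 ++ (k, v) :: l2)).insert k w = PySem.Dict.mk (l1 ++ (k, w) :: l2) := by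
  unfold PySem.Dict.insert
  rw [if_pos (contains_of_split l1 l2 k v)]
  exact congrArg PySem.Dict.mk (map_on_split l1 l2 k v w h1 h2)

theorem modify_of_split (l1 l2 : List (String × PySem.Set String)) (k : String) (v d0 : PySem.Set String)
    (f : PySem.Set String → PySem.Set String)
    (h1 : ∀ q ∈ l1, q.1 ≠ k) (h2 : ∀ q ∈ l2, q.1 ≠ k) :
    (PySem.Dict.mk (l1 ++ (k, v) :: l2)).modify k d0 f = PySem.Dict.mk (l1 ++ (k, f v) :: l2) := by
  unfold PySem.Dict.modify
  rw [getD_of_split l1 l2 k v d0 h1, insert_of_split l1 l2 k v (f v) h1 h2]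

theorem insert_of_absent (d : PySem.Dict String (PySem.Set String)) (k : String) (w : PySem.Set String)
    (h : k ∉ d.keys) :
    d.insert k w = PySem.Dict.mk (d.items ++ [(k, w)]) := by
  unfold PySem.Dict.insert
  rw [if_neg (by intro hc; exact h ((dict_contains_iff d k).mp hc))]

theorem getD_of_absent (d : PySem.Dict String (PySem.Set String)) (k : String) (d0 : PySem.Set String)
    (h : k ∉ d.keys) :
    d.getD k d0 = d0 := by
  have hfind : List.find? (fun p => p.1 == k) d.items = none := by
    rw [List.find?_eq_none]
    intro p hp h'
    exact h ((beq_iff_eq.mp h') ▸ List.mem_map_of_mem (f := fun x => x.1) hp)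
  simp [PySem.Dict.getD, PySem.Dict.get?, hfind]

theorem modify_of_absent (d : PySem.Dict String (PySem.Set String)) (k : String) (d0 : PySem.Set String)
    (f : PySem.Set String → PySem.Set String) (h : k ∉ d.keys) :
    d.modify k d0 f = PySem.Dict.mk (d.items ++ [(k, f d0)]) := by
  unfold PySem.Dict.modify
  rw [getD_of_absent d k d0 h, insert_of_absent d k (f d0) h]

-- decomposition of an association list at a present key (under nodup keys)
theorem list_decomp (l : List (String × PySem.Set String)) (k : String)
    (hmem : k ∈ l.map (fun x => x.1)) (hnd : (l.map (fun x => x.1)).Nodup) :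
    ∃ l1 v l2, l = l1 ++ (k, v) :: l2 ∧ (∀ q ∈ l1, q.1 ≠ k) ∧ (∀ q ∈ l2, q.1 ≠ k) := by
  induction l with
  | nil => simp at hmem
  | cons a t ih =>
      rw [List.map_cons] at hmem hnd
      obtain ⟨hnotin, hndt⟩ := List.nodup_cons.mp hnd
      by_cases hk : a.1 = k
      · refine ⟨[], a.2, t, by simp [← hk], by simp, ?_⟩
        intro q hq he
        exact hnotin (by rw [hk, ← he]; exact List.mem_map_of_mem (f := fun x => x.1) hq)
      · have hmem' : k ∈ t.map (fun x => x.1) := by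
          rcases List.mem_cons.mp hmem with h | h
          · exact absurd h.symm hk
          · exact h
        obtain ⟨l1, v, l2, he, h1, h2⟩ := ih hmem' hndt
        refine ⟨a :: l1, v, l2, by simp [he], ?_, h2⟩
        intro q hq
        rcases List.mem_cons.mp hq with rfl | hq'
        · exact hk
        · exact h1 q hq'

theorem dict_decomp (d : PySem.Dict String (PySem.Set String)) (k : String)
    (hmem : k ∈ d.keys) (hnd : d.keys.Nodup) :
    ∃ l1 v l2, d.items = l1 ++ (k, v) :: l2 ∧ (∀ q ∈ l1, q.1 ≠ k) ∧ (∀ q ∈ l2, q.1 ≠ k) :=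
  list_decomp d.items k hmem hnd

-- behaviour of EnsD / AddD at present and absent keys
theorem EnsD_present (d : PySem.Dict String (PySem.Set String)) (n : String)
    (hmem : n ∈ d.keys) (hnd : d.keys.Nodup) : EnsD d n = d := by
  obtain ⟨l1, v, l2, he, h1, h2⟩ := dict_decomp d n hmem hnd
  have hd : d = PySem.Dict.mk (l1 ++ (n, v) :: l2) := by cases d; simpa using he
  rw [hd]
  unfold EnsD
  rw [getD_of_split l1 l2 n v _ h1, insert_of_split l1 l2 n v v h1 h2]

theorem EnsD_absent (d : PySem.Dict String (PySem.Set String)) (n : String)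
    (h : n ∉ d.keys) : EnsD d n = PySem.Dict.mk (d.items ++ [(n, PySem.Set.empty)]) := by
  unfold EnsD
  rw [getD_of_absent d n _ h, insert_of_absent d n _ h]

theorem keys_EnsD_absent (d : PySem.Dict String (PySem.Set String)) (n : String)
    (h : n ∉ d.keys) : (EnsD d n).keys = d.keys ++ [n] := by
  rw [EnsD_absent d n h]; simp [PySem.Dict.keys]

theorem AddD_items (c : String) (d : PySem.Dict String (PySem.Set String)) (p : String)
    (hmem : p ∈ d.keys) (hnd : d.keys.Nodup) :
    (AddD c d p).items = d.items.map (fun kv => if kv.1 == p then (kv.1, PySem.Set.add kv.2 c) else kv) := by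
  obtain ⟨l1, v, l2, he, h1, h2⟩ := dict_decomp d p hmem hnd
  have hd : d = PySem.Dict.mk (l1 ++ (p, v) :: l2) := by cases d; simpa using he
  rw [hd]
  unfold AddD
  rw [modify_of_split l1 l2 p v _ _ h1 h2]
  show l1 ++ (p, PySem.Set.add v c) :: l2
      = (l1 ++ (p, v) :: l2).map (fun kv => if kv.1 == p then (kv.1, PySem.Set.add kv.2 c) else kv)
  rw [List.map_append, List.map_cons]
  congr 1
  · exact ((List.map_congr_left (fun q hq => by simp [h1 q hq])).trans (List.map_id l1)).symm
  congr 1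
  · simp
  · exact ((List.map_congr_left (fun q hq => by simp [h2 q hq])).trans (List.map_id l2)).symm

theorem keys_AddD_present (c : String) (d : PySem.Dict String (PySem.Set String)) (p : String)
    (hmem : p ∈ d.keys) (hnd : d.keys.Nodup) : (AddD c d p).keys = d.keys := by
  rw [show (AddD c d p).keys = (AddD c d p).items.map (fun x => x.1) from rfl,
      AddD_items c d p hmem hnd, List.map_map]
  show List.map _ d.items = d.items.map (fun x => x.1)
  apply List.map_congr_left
  intro q hq
  by_cases h : q.1 = p <;> simp [Function.comp, h]

theorem keys_AddD_absent (c : String) (d : PySem.Dict String (PySem.Set String)) (p : String)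
    (h : p ∉ d.keys) : (AddD c d p).keys = d.keys ++ [p] := by
  unfold AddD
  rw [modify_of_absent d p _ _ h]
  simp [PySem.Dict.keys]

theorem nodup_EnsD (d : PySem.Dict String (PySem.Set String)) (n : String)
    (hnd : d.keys.Nodup) : (EnsD d n).keys.Nodup := by
  by_cases h : n ∈ d.keys
  · rw [EnsD_present d n h hnd]; exact hnd
  · rw [keys_EnsD_absent d n h]
    exact List.Nodup.append hnd (List.nodup_singleton n) (by simpa using h)

theorem nodup_AddD (c : String) (d : PySem.Dict String (PySem.Set String)) (p : String)
    (hnd : d.keys.Nodup) : (AddD c d p).keys.Nodup := by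
  by_cases h : p ∈ d.keys
  · rw [keys_AddD_present c d p h hnd]; exact hnd
  · rw [keys_AddD_absent c d p h]
    exact List.Nodup.append hnd (List.nodup_singleton p) (by simpa using h)

theorem mem_keys_EnsD (d : PySem.Dict String (PySem.Set String)) (n p : String)
    (hnd : d.keys.Nodup) (h : p ∈ d.keys ∨ p = n) : p ∈ (EnsD d n).keys := by
  by_cases hm : n ∈ d.keys
  · rw [EnsD_present d n hm hnd]
    rcases h with h | rfl
    · exact h
    · exact hm
  · rw [keys_EnsD_absent d n hm]
    rcases h with h | rfl
    · exact List.mem_append_left _ h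
    · exact List.mem_append_right _ (by simp)

-- the single commutation: ensuring n commutes past an edge-add at a present key p
theorem EnsD_AddD_comm (c n p : String) (d : PySem.Dict String (PySem.Set String))
    (hmem : p ∈ d.keys) (hnd : d.keys.Nodup) :
    EnsD (AddD c d p) n = AddD c (EnsD d n) p := by
  by_cases hn : n ∈ d.keys
  · rw [EnsD_present d n hn hnd, EnsD_present (AddD c d p) n (by rw [keys_AddD_present c d p hmem hnd]; exact hn) (nodup_AddD c d p hnd)]
  · obtain ⟨l1, v, l2, he, h1, h2⟩ := dict_decomp d p hmem hnd
    have hd : d = PySem.Dict.mk (l1 ++ (p, v) :: l2) := by cases d; simpa using he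
    have hnp : n ≠ p := fun hc => hn (hc ▸ hmem)
    rw [hd]
    have hA : AddD c (PySem.Dict.mk (l1 ++ (p, v) :: l2)) p
        = PySem.Dict.mk (l1 ++ (p, PySem.Set.add v c) :: l2) := by
      unfold AddD; rw [modify_of_split l1 l2 p v _ _ h1 h2]
    have hnA : n ∉ (PySem.Dict.mk (l1 ++ (p, PySem.Set.add v c) :: l2)).keys := by
      have := hd ▸ hn
      simp [PySem.Dict.keys] at this ⊢
      exact this
    rw [hA, EnsD_absent _ n hnA]
    have hnE : n ∉ (PySem.Dict.mk (l1 ++ (p, v) :: l2)).keys := hd ▸ hn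
    rw [EnsD_absent _ n hnE]
    have : (PySem.Dict.mk ((l1 ++ (p, v) :: l2) ++ [(n, PySem.Set.empty)]))
        = PySem.Dict.mk (l1 ++ (p, v) :: (l2 ++ [(n, PySem.Set.empty)])) := by simp
    rw [this]
    unfold AddD
    rw [modify_of_split l1 (l2 ++ [(n, PySem.Set.empty)]) p v _ _ h1 (by
      intro q hq
      rcases List.mem_append.mp hq with hq | hq
      · exact h2 q hq
      · simp at hq; rw [hq]; simpa using hnp)]
    simp

-- fold version of the commutation
theorem EnsFold_AddD_comm (ns : List String) (c p : String) (d : PySem.Dict String (PySem.Set String))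
    (hmem : p ∈ d.keys) (hnd : d.keys.Nodup) :
    EnsFold (AddD c d p) ns = AddD c (EnsFold d ns) p := by
  induction ns generalizing d with
  | nil => rfl
  | cons n ns ih =>
      show EnsFold (EnsD (AddD c d p) n) ns = AddD c (EnsFold (EnsD d n) ns) p
      rw [EnsD_AddD_comm c n p d hmem hnd]
      exact ih (EnsD d n) (mem_keys_EnsD d n p hnd (Or.inl hmem)) (nodup_EnsD d n hnd)

-- A's interleaved body over one item equals ensure-all-then-add-all for that item
theorem step_eq_ens_pop (c : String) (ps : List String) (d0 : PySem.Dict String (PySem.Set String))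
    (hnd : d0.keys.Nodup) :
    ps.foldl (fun d p => AddD c (EnsD d p) p) d0 = PopOne (EnsFold d0 ps) c ps := by
  induction ps generalizing d0 with
  | nil => rfl
  | cons p rest ih =>
      show rest.foldl (fun d p => AddD c (EnsD d p) p) (AddD c (EnsD d0 p) p)
          = PopOne (EnsFold (EnsD d0 p) rest) c (p :: rest)
      rw [ih (AddD c (EnsD d0 p) p) (nodup_AddD c _ p (nodup_EnsD d0 p hnd))]
      show PopOne (EnsFold (AddD c (EnsD d0 p) p) rest) c rest
          = rest.foldl (fun d q => AddD c d q) (AddD c (EnsFold (EnsD d0 p) rest) p)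
      rw [EnsFold_AddD_comm rest c p (EnsD d0 p) (mem_keys_EnsD d0 p p hnd (Or.inr rfl)) (nodup_EnsD d0 p hnd)]
      rfl

-- ensuring a batch of nodes commutes past a whole edge-population step whose targets are present
theorem EnsFold_PopOne_comm (ps ns : List String) (c : String) (d : PySem.Dict String (PySem.Set String))
    (hnd : d.keys.Nodup) (hsub : ∀ p ∈ ps, p ∈ d.keys) :
    EnsFold (PopOne d c ps) ns = PopOne (EnsFold d ns) c ps := by
  induction ps generalizing d with
  | nil => rfl
  | cons p rest ih =>
      have hp : p ∈ d.keys := hsub p (by simp)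
      show EnsFold (PopOne (AddD c d p) c rest) ns = rest.foldl (fun d q => AddD c d q) (AddD c (EnsFold d ns) p)
      rw [ih (AddD c d p) (nodup_AddD c d p hnd) (fun q hq => by
        rw [keys_AddD_present c d p hp hnd]; exact hsub q (by simp [hq]))]
      rw [EnsFold_AddD_comm ns c p d hp hnd]
      rfl

theorem mem_keys_EnsFold (ns : List String) (d : PySem.Dict String (PySem.Set String)) (p : String)
    (hnd : d.keys.Nodup) (h : p ∈ d.keys ∨ p ∈ ns) : p ∈ (EnsFold d ns).keys := by
  induction ns generalizing d with
  | nil => simpa using h.resolve_right (by simp)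
  | cons n ns ih =>
      show p ∈ (EnsFold (EnsD d n) ns).keys
      apply ih (EnsD d n) (nodup_EnsD d n hnd)
      rcases h with h | h
      · exact Or.inl (mem_keys_EnsD d n p hnd (Or.inl h))
      · rcases List.mem_cons.mp h with he | h'
        · exact Or.inl (mem_keys_EnsD d n p hnd (Or.inr he))
        · exact Or.inr h'

theorem nodup_EnsFold (ns : List String) (d : PySem.Dict String (PySem.Set String))
    (hnd : d.keys.Nodup) : (EnsFold d ns).keys.Nodup := by
  induction ns generalizing d with
  | nil => exact hnd
  | cons n ns ih => exact ih (EnsD d n) (nodup_EnsD d n hnd)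

theorem nodup_PopOne (ps : List String) (c : String) (d : PySem.Dict String (PySem.Set String))
    (hnd : d.keys.Nodup) : (PopOne d c ps).keys.Nodup := by
  induction ps generalizing d with
  | nil => exact hnd
  | cons p rest ih => exact ih (AddD c d p) (nodup_AddD c d p hnd)

theorem keys_PopOne (ps : List String) (c : String) (d : PySem.Dict String (PySem.Set String))
    (hnd : d.keys.Nodup) (hsub : ∀ p ∈ ps, p ∈ d.keys) : (PopOne d c ps).keys = d.keys := by
  induction ps generalizing d with
  | nil => rfl
  | cons p rest ih =>
      have hp : p ∈ d.keys := hsub p (by simp)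
      show (PopOne (AddD c d p) c rest).keys = d.keys
      rw [ih (AddD c d p) (nodup_AddD c d p hnd) (fun q hq => by
        rw [keys_AddD_present c d p hp hnd]; exact hsub q (by simp [hq]))]
      exact keys_AddD_present c d p hp hnd

-- A's interleaved fold = table pass then population pass (decomposition of A)
theorem main_decomp (l : List (String × List String)) (d : PySem.Dict String (PySem.Set String))
    (hnd : d.keys.Nodup) :
    l.foldl (fun d cp => cp.2.foldl (fun d p => AddD cp.1 (EnsD d p) p) (EnsD d cp.1)) d
      = l.foldl (fun d cp => PopOne d cp.1 cp.2) (EnsFold d (NodeSeq l)) := by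
  induction l generalizing d with
  | nil => rfl
  | cons cp l ih =>
      obtain ⟨c, ps⟩ := cp
      have hndc : (EnsD d c).keys.Nodup := nodup_EnsD d c hnd
      have hX : (EnsFold (EnsD d c) ps).keys.Nodup := nodup_EnsFold ps (EnsD d c) hndc
      show l.foldl _ (ps.foldl (fun d p => AddD c (EnsD d p) p) (EnsD d c)) = _
      rw [step_eq_ens_pop c ps (EnsD d c) hndc]
      rw [ih (PopOne (EnsFold (EnsD d c) ps) c ps) (nodup_PopOne ps c _ hX)]
      rw [EnsFold_PopOne_comm ps (NodeSeq l) c (EnsFold (EnsD d c) ps) hX (fun p hp =>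
        mem_keys_EnsFold ps (EnsD d c) p hndc (Or.inr hp))]
      have hseq : EnsFold (EnsFold (EnsD d c) ps) (NodeSeq l) = EnsFold d (NodeSeq ((c, ps) :: l)) := by
        show EnsFold (EnsFold d (c :: ps)) (NodeSeq l) = _
        unfold EnsFold NodeSeq
        rw [← List.foldl_append]
        simp
      rw [hseq]
      rfl

-- the table pass over a node list: items are the first-occurrence nodes, each with an empty set
theorem ensFold_items (ns : List String) (s : PySem.Set String) (hnd : s.Nodup) :
    (EnsFold (PySem.Dict.mk (s.map (fun n => (n, (PySem.Set.empty : PySem.Set String))))) ns).items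
      = (ns.foldl PySem.Set.add s).map (fun n => (n, PySem.Set.empty)) := by
  induction ns generalizing s with
  | nil => rfl
  | cons n ns ih =>
      have hkeys : (PySem.Dict.mk (s.map (fun n => (n, (PySem.Set.empty : PySem.Set String))))).keys = s := by
        show List.map (fun x => x.1) (s.map (fun n => (n, (PySem.Set.empty : PySem.Set String)))) = s
        rw [List.map_map]
        exact (List.map_congr_left (fun a _ => rfl)).trans (List.map_id s)
      show (EnsFold (EnsD (PySem.Dict.mk (s.map (fun n => (n, PySem.Set.empty)))) n) ns).items = _
      by_cases hm : n ∈ s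
      · rw [EnsD_present _ n (by rw [hkeys]; exact hm) (by rw [hkeys]; exact hnd)]
        rw [ih s hnd]
        rw [show ((n :: ns).foldl PySem.Set.add s) = ns.foldl PySem.Set.add (PySem.Set.add s n) from rfl,
            PySem.Set.add_of_mem hm]
      · rw [EnsD_absent _ n (by rw [hkeys]; exact hm)]
        have : (PySem.Dict.mk (s.map (fun n => (n, (PySem.Set.empty : PySem.Set String))))).items
            ++ [(n, (PySem.Set.empty : PySem.Set String))]
            = (s ++ [n]).map (fun n => (n, PySem.Set.empty)) := by simp
        rw [this]
        rw [ih (s ++ [n]) (by exact List.Nodup.append hnd (List.nodup_singleton n) (by simpa using hm))]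
        rw [show ((n :: ns).foldl PySem.Set.add s) = ns.foldl PySem.Set.add (PySem.Set.add s n) from rfl,
            PySem.Set.add_of_not_mem hm]

-- one population step acts pointwise on the items list
theorem PopOne_items (c : String) (ps : List String) (d : PySem.Dict String (PySem.Set String))
    (hnd : d.keys.Nodup) (hsub : ∀ p ∈ ps, p ∈ d.keys) :
    (PopOne d c ps).items
      = d.items.map (fun kv => (kv.1, if ps.contains kv.1 then PySem.Set.add kv.2 c else kv.2)) := by
  induction ps generalizing d with
  | nil =>
      show d.items = d.items.map (fun kv => (kv.1, kv.2))
      simp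
  | cons p rest ih =>
      have hp : p ∈ d.keys := hsub p (by simp)
      show (PopOne (AddD c d p) c rest).items = _
      rw [ih (AddD c d p) (nodup_AddD c d p hnd) (fun q hq => by
        rw [keys_AddD_present c d p hp hnd]; exact hsub q (by simp [hq]))]
      rw [AddD_items c d p hp hnd, List.map_map]
      apply List.map_congr_left
      intro kv _
      by_cases h1 : kv.1 = p
      · simp [Function.comp, h1]
      · simp [Function.comp, h1]

-- the whole population pass acts pointwise on the items list
theorem PopAll_items (l : List (String × List String)) (d : PySem.Dict String (PySem.Set String))
    (hnd : d.keys.Nodup) (hsub : ∀ cp ∈ l, ∀ p ∈ cp.2, p ∈ d.keys) :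
    (l.foldl (fun d cp => PopOne d cp.1 cp.2) d).items
      = d.items.map (fun kv =>
          (kv.1, l.foldl (fun s cp => if cp.2.contains kv.1 then PySem.Set.add s cp.1 else s) kv.2)) := by
  induction l generalizing d with
  | nil =>
      show d.items = d.items.map (fun kv => (kv.1, kv.2))
      simp
  | cons cp l ih =>
      obtain ⟨c, ps⟩ := cp
      have hps : ∀ p ∈ ps, p ∈ d.keys := hsub (c, ps) (by simp)
      show (l.foldl (fun d cp => PopOne d cp.1 cp.2) (PopOne d c ps)).items = _
      rw [ih (PopOne d c ps) (nodup_PopOne ps c d hnd) (fun q hq p hp => by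
        rw [keys_PopOne ps c d hnd hps]; exact hsub q (by simp [hq]) p hp)]
      rw [PopOne_items c ps d hnd hps, List.map_map]
      rfl

-- B's order-building fold over a node list is exactly the Set.add fold, in both components
theorem orderStep1_eq (s : PySem.Set String) (n : String) :
    (if PySem.Set.contains s n then ((s, s) : List String × PySem.Set String)
     else (s ++ [n], PySem.Set.add s n))
      = (PySem.Set.add s n, PySem.Set.add s n) := by
  by_cases hm : n ∈ s
  · rw [if_pos ((PySem.Set.contains_iff s n).mpr hm), PySem.Set.add_of_mem hm]
  · rw [if_neg (by
      intro h
      exact hm ((PySem.Set.contains_iff s n).mp h)), PySem.Set.add_of_not_mem hm]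

theorem orderStep_eq (ns : List String) (s : PySem.Set String) :
    ns.foldl
      (fun (acc : List String × PySem.Set String) n =>
        if PySem.Set.contains acc.2 n then acc
        else (acc.1 ++ [n], PySem.Set.add acc.2 n)) (s, s)
      = (ns.foldl PySem.Set.add s, ns.foldl PySem.Set.add s) := by
  induction ns generalizing s with
  | nil => rfl
  | cons n ns ih =>
      simp only [List.foldl_cons]
      rw [orderStep1_eq s n]
      exact ih (PySem.Set.add s n)

theorem orderFold_eq (l : List (String × List String)) (s : PySem.Set String) :
    l.foldl
      (fun (acc : List String × PySem.Set String) cp =>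
        (cp.1 :: cp.2).foldl
          (fun acc n =>
            if PySem.Set.contains acc.2 n then acc
            else (acc.1 ++ [n], PySem.Set.add acc.2 n)) acc) (s, s)
      = ((NodeSeq l).foldl PySem.Set.add s, (NodeSeq l).foldl PySem.Set.add s) := by
  induction l generalizing s with
  | nil => rfl
  | cons cp l ih =>
      show (List.foldl
          (fun (acc : List String × PySem.Set String) cp =>
            (cp.1 :: cp.2).foldl
              (fun acc n =>
                if PySem.Set.contains acc.2 n then acc
                else (acc.1 ++ [n], PySem.Set.add acc.2 n)) acc)
          ((cp.1 :: cp.2).foldl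
            (fun (acc : List String × PySem.Set String) n =>
              if PySem.Set.contains acc.2 n then acc
              else (acc.1 ++ [n], PySem.Set.add acc.2 n)) (s, s)) l)
        = ((NodeSeq (cp :: l)).foldl PySem.Set.add s, (NodeSeq (cp :: l)).foldl PySem.Set.add s)
      rw [orderStep_eq (cp.1 :: cp.2) s]
      rw [ih ((cp.1 :: cp.2).foldl PySem.Set.add s)]
      have : NodeSeq (cp :: l) = (cp.1 :: cp.2) ++ NodeSeq l := by
        simp [NodeSeq]
      rw [this, List.foldl_append]

-- ===== VERDICT (by name: the statement is the Claim_ definition above) =====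
theorem make_children_spec : Claim_equal_make_children := by
  intro parents _
  show make_children parents = make_children_alt parents
  have hempty : (PySem.Dict.empty : PySem.Dict String (PySem.Set String)).keys.Nodup := by
    simp [PySem.Dict.empty, PySem.Dict.keys]
  -- the node set of the input, in first-appearance order
  set u : PySem.Set String := (NodeSeq parents).foldl PySem.Set.add [] with hu
  have hund : u.Nodup := by
    rw [hu, ← PySem.Set.ofList_eq_foldl]
    exact PySem.Set.nodup_ofList (NodeSeq parents)
  -- A: decompose into table pass + population pass, then read the items off pointwise
  have htable : EnsFold PySem.Dict.empty (NodeSeq parents)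
      = PySem.Dict.mk (u.map (fun n => (n, PySem.Set.empty))) := by
    apply PySem.Dict.ext
    have h0 : (PySem.Dict.empty : PySem.Dict String (PySem.Set String))
        = PySem.Dict.mk (([] : List String).map (fun n => (n, PySem.Set.empty))) := rfl
    rw [h0, ensFold_items (NodeSeq parents) [] (List.nodup_nil)]
  have hkeys : (PySem.Dict.mk (u.map (fun n => (n, (PySem.Set.empty : PySem.Set String))))).keys = u := by
    show List.map (fun x => x.1) (u.map (fun n => (n, (PySem.Set.empty : PySem.Set String)))) = u
    rw [List.map_map]
    exact (List.map_congr_left (fun a _ => rfl)).trans (List.map_id u)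
  have hA : make_children parents
      = u.map (fun n =>
          (n, parents.foldl (fun s cp => if cp.2.contains n then PySem.Set.add s cp.1 else s)
                PySem.Set.empty)) := by
    show (parents.foldl (fun d cp => cp.2.foldl (fun d p => AddD cp.1 (EnsD d p) p) (EnsD d cp.1)) PySem.Dict.empty).items = _
    rw [main_decomp parents PySem.Dict.empty hempty, htable]
    rw [PopAll_items parents _ (by rw [hkeys]; exact hund) (fun cp hcp p hp => by
      rw [hkeys, hu, ← PySem.Set.ofList_eq_foldl]
      exact (PySem.Set.mem_ofList (NodeSeq parents) p).mpr (by
        simp only [NodeSeq, List.mem_flatMap]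
        exact ⟨cp, hcp, by simp [hp]⟩))]
    show (u.map (fun n => (n, (PySem.Set.empty : PySem.Set String)))).map _ = _
    rw [List.map_map]
    rfl
  -- B: its first fold is the same node list u
  have hB : make_children_alt parents
      = u.map (fun n =>
          (n, parents.foldl (fun s cp => if cp.2.contains n then PySem.Set.add s cp.1 else s)
                PySem.Set.empty)) := by
    show (parents.foldl
        (fun (acc : List String × PySem.Set String) cp =>
          (cp.1 :: cp.2).foldl
            (fun acc n =>
              if PySem.Set.contains acc.2 n then acc
              else (acc.1 ++ [n], PySem.Set.add acc.2 n)) acc)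
        ([], PySem.Set.empty)).1.map _ = _
    rw [show (([], PySem.Set.empty) : List String × PySem.Set String) = (([] : PySem.Set String), ([] : PySem.Set String)) from rfl]
    rw [orderFold_eq parents []]

  rw [hA, hB]
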